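-- pv_equiv track=rewrite | github.com/nurullokosimov25-alt/Tasks-and-Solutions | ЛР8.1.py | find_pairs_above_threshold
-- ===== SOURCE A (Python) =====
-- def find_pairs_above_threshold(operations, threshold):
--     # 1. Сортируем копию данных
--     sorted_ops = sorted(operations)
--     n = len(sorted_ops)
--     pairs = []
--
--     left = 0
--     right = n - 1
--
--     # 2. Метод двух указателей
--     while left < right:
--         current_sum = sorted_ops[left] + sorted_ops[right]
--
--         if current_sum > threshold:
--             # Если сумма крайних больше порога, то правый элемент
--             # образует валидную пару со всеми элементами между left и right.
--             for i in range(left, right):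
--                 pairs.append((sorted_ops[i], sorted_ops[right]))
--
--             # Сдвигаем правый указатель, чтобы искать новые пары
--             right -= 1
--         else:
--             # Сумма слишком мала, нужно увеличить левый элемент
--             left += 1
--
--     return pairs
-- ===== SOURCE B (Python) =====
-- def find_pairs_above_threshold(operations, threshold):
--     s = sorted(operations)
--     return _pairs_down(s, threshold, len(s) - 1)
--
--
-- def _pairs_down(s, t, j):
--     # pairs for partner index j, then recursively for j-1, ..., 1
--     if j <= 0:
--         return []
--     layer = [(s[i], s[j]) for i in range(j) if s[i] + s[j] > t]
--     return layer + _pairs_down(s, t, j - 1)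
-- ===== Notes on version B (the rewrite author's own statement) =====
-- stated objective: simpler
-- what changed: Replaces the two-pointer while-loop with mutable left/right state by a direct recursive scan: for each partner index j from n-1 down to 1, emit every i<j with s[i]+s[j] > threshold via a comprehension.
import Mathlib
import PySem

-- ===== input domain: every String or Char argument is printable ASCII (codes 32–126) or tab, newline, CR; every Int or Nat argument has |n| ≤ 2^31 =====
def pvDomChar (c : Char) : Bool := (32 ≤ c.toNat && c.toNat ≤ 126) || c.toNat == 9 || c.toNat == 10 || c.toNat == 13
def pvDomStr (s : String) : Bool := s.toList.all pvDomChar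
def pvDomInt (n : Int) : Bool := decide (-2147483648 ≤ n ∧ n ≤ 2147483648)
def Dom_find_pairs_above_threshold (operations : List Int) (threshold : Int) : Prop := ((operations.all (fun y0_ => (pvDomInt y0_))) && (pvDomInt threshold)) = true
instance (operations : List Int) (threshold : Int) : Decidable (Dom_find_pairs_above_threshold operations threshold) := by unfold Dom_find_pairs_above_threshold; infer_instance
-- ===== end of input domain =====

-- B replaces A's two-pointer while-loop by a direct recursive per-partner scan (objective: simpler).

-- ===== PORT A =====
-- the while loop of A; left/right are Nat: in Python left starts at 0 and only increases,
-- and whenever the loop body runs 0 ≤ left < right < n, so Nat indices and Nat subtraction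
-- right-1 are exact; when n = 0 Python has right = -1 and the guard 0 < -1 fails just as 0 < 0 does.
def pvLoopA (s : List Int) (t : Int) (left right : Nat) (acc : List (Int × Int)) :
    List (Int × Int) :=
  if left < right then
    if s.getD left 0 + s.getD right 0 > t then
      -- for i in range(left, right): pairs.append((sorted_ops[i], sorted_ops[right]))
      pvLoopA s t left (right - 1)
        (acc ++ (List.range' left (right - left)).map (fun i => (s.getD i 0, s.getD right 0)))
    else
      pvLoopA s t (left + 1) right acc
  else acc
termination_by right - left
decreasing_by all_goals omega

def find_pairs_above_threshold (operations : List Int) (threshold : Int) : List (Int × Int) :=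
  let sorted_ops := PySem.List.sorted operations (fun x => x) false
  let n := sorted_ops.length
  pvLoopA sorted_ops threshold 0 (n - 1) []

-- ===== PORT B =====
-- _pairs_down from Source B: pairs for partner index j, then recursively for j-1, …, 1
def pvPairsDown (s : List Int) (t : Int) (j : Nat) : List (Int × Int) :=
  match j with
  | 0 => []
  | j' + 1 =>
    ((List.range (j' + 1)).filter (fun i => s.getD i 0 + s.getD (j' + 1) 0 > t)).map
      (fun i => (s.getD i 0, s.getD (j' + 1) 0))
    ++ pvPairsDown s t j'

def find_pairs_above_threshold_alt (operations : List Int) (threshold : Int) : List (Int × Int) :=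
  let s := PySem.List.sorted operations (fun x => x) false
  pvPairsDown s threshold (s.length - 1)

-- ===== PRECONDITION & SPEC =====
def Spec_find_pairs_above_threshold (operations : List Int) (threshold : Int) (out : List (Int × Int)) : Prop := out = find_pairs_above_threshold_alt operations threshold
instance (operations : List Int) (threshold : Int) (out : List (Int × Int)) : Decidable (Spec_find_pairs_above_threshold operations threshold out) := by unfold Spec_find_pairs_above_threshold; infer_instance

-- ===== CLAIM (what is proved, stated in full; the proofs are below) =====
def Claim_equal_find_pairs_above_threshold : Prop := ∀ (operations : List Int) (threshold : Int), Dom_find_pairs_above_threshold operations threshold → Spec_find_pairs_above_threshold operations threshold (find_pairs_above_threshold operations threshold)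

-- ===== LEMMAS AND PROOFS =====

-- index-monotonicity of a list, phrased with getD
def pvMono (s : List Int) : Prop :=
  ∀ i j : Nat, i ≤ j → j < s.length → s.getD i 0 ≤ s.getD j 0

theorem pvMono_sorted (xs : List Int) :
    pvMono (PySem.List.sorted xs (fun x => x) false) := by
  intro i j hij hj
  rw [List.getD_eq_getElem _ _ (lt_of_le_of_lt hij hj), List.getD_eq_getElem _ _ hj]
  exact PySem.List.sorted_id_getElem_mono xs hij hj

-- on a sorted list, the qualifying i for partner j form exactly the suffix [left, j)
theorem pvLayer_eq (s : List Int) (t : Int) (j left : Nat)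
    (hm : pvMono s) (hlj : left ≤ j) (hj : j < s.length)
    (hsmall : ∀ i, i < left → s.getD i 0 + s.getD j 0 ≤ t)
    (hbig : s.getD left 0 + s.getD j 0 > t) :
    (List.range j).filter (fun i => s.getD i 0 + s.getD j 0 > t) =
      List.range' left (j - left) := by
  have hr : List.range j = List.range left ++ List.range' left (j - left) := by
    rw [List.range'_eq_map_range, ← List.range_add]
    congr 1
    omega
  have h1 : (List.range left).filter (fun i => s.getD i 0 + s.getD j 0 > t) = [] := by
    apply List.filter_eq_nil_iff.mpr
    intro i hi
    simp only [List.mem_range] at hi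
    simp only [decide_eq_true_eq, gt_iff_lt, not_lt]
    exact hsmall i hi
  have h2 : (List.range' left (j - left)).filter (fun i => s.getD i 0 + s.getD j 0 > t)
      = List.range' left (j - left) := by
    apply List.filter_eq_self.mpr
    intro i hi
    simp only [List.mem_range'] at hi
    obtain ⟨k, hk, hik⟩ := hi
    have hle : s.getD left 0 ≤ s.getD i 0 := hm left i (by omega) (by omega)
    simp only [decide_eq_true_eq, gt_iff_lt]
    omega
  rw [hr, List.filter_append, h1, h2, List.nil_append]

theorem pvPairsDown_eq_nil (s : List Int) (t : Int) (R : Nat)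
    (hm : pvMono s) (hR : R < s.length)
    (hsmall : ∀ i, i < R → s.getD i 0 + s.getD R 0 ≤ t) :
    ∀ j, j ≤ R → pvPairsDown s t j = [] := by
  intro j
  induction j with
  | zero => intro _; rfl
  | succ j' ih =>
    intro hjR
    have hlayer : (List.range (j' + 1)).filter
        (fun i => s.getD i 0 + s.getD (j' + 1) 0 > t) = [] := by
      apply List.filter_eq_nil_iff.mpr
      intro i hi
      simp only [List.mem_range] at hi
      have h1 : s.getD (j' + 1) 0 ≤ s.getD R 0 := hm _ _ hjR hR
      have h2 : s.getD i 0 + s.getD R 0 ≤ t := hsmall i (by omega)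
      simp only [decide_eq_true_eq, gt_iff_lt, not_lt]
      omega
    simp only [pvPairsDown, hlayer, List.map_nil, List.nil_append]
    exact ih (by omega)

theorem pvLoopA_eq (s : List Int) (t : Int) (hm : pvMono s) :
    ∀ (fuel L R : Nat) (acc : List (Int × Int)), R - L ≤ fuel → L ≤ R → R < s.length →
      (∀ i, i < L → s.getD i 0 + s.getD R 0 ≤ t) →
      pvLoopA s t L R acc = acc ++ pvPairsDown s t R := by
  intro fuel
  induction fuel with
  | zero =>
    intro L R acc hfuel hLR hR hsmall
    have hLR' : L = R := by omega
    rw [pvLoopA]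
    simp only [hLR', lt_irrefl, if_false]
    rw [pvPairsDown_eq_nil s t R hm hR (hLR' ▸ hsmall) R le_rfl, List.append_nil]
  | succ f ih =>
    intro L R acc hfuel hLR hR hsmall
    rw [pvLoopA]
    by_cases hlt : L < R
    · simp only [hlt, if_true]
      by_cases hbig : s.getD L 0 + s.getD R 0 > t
      · simp only [hbig, if_true]
        have hR1 : R = (R - 1) + 1 := by omega
        have hrec := ih L (R - 1)
          (acc ++ (List.range' L (R - L)).map (fun i => (s.getD i 0, s.getD R 0)))
          (by omega) (by omega) (by omega)
          (fun i hi => by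
            have h1 : s.getD (R - 1) 0 ≤ s.getD R 0 := hm _ _ (by omega) hR
            have h2 := hsmall i hi
            omega)
        rw [hrec, List.append_assoc]
        congr 1
        conv_rhs => rw [hR1]
        rw [pvPairsDown]
        congr 1
        rw [← hR1, pvLayer_eq s t R L hm (by omega) hR hsmall hbig]
      · simp only [hbig, if_false]
        apply ih (L + 1) R acc (by omega) (by omega) hR
        intro i hi
        rcases Nat.lt_succ_iff_lt_or_eq.mp hi with h | h
        · exact hsmall i h
        · subst h; omega
    · simp only [hlt, if_false]
      have hLR' : L = R := by omega
      rw [pvPairsDown_eq_nil s t R hm hR (hLR' ▸ hsmall) R le_rfl, List.append_nil]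

-- ===== VERDICT (by name: the statement is the Claim_ definition above) =====
theorem find_pairs_above_threshold_spec : Claim_equal_find_pairs_above_threshold := by
  intro operations threshold _
  unfold Spec_find_pairs_above_threshold find_pairs_above_threshold find_pairs_above_threshold_alt
  set s := PySem.List.sorted operations (fun x => x) false with hs
  have hm : pvMono s := pvMono_sorted operations
  cases hlen : s.length with
  | zero =>
    simp only [hlen]
    rw [pvLoopA]
    simp only [Nat.zero_sub, lt_irrefl, if_false]
    have : s = [] := List.length_eq_zero_iff.mp hlen
    rw [this]; rfl
  | succ n =>
    simp only [hlen]
    have h := pvLoopA_eq s threshold hm n 0 ((n + 1) - 1) [] (by omega) (by omega)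
      (by omega) (fun i hi => absurd hi (Nat.not_lt_zero i))
    simpa using h
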